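-- pv_equiv track=rewrite | github.com/dmitry-irtegov/NSU-Python2024 | problems-6/v-lomakin/problem1.py | alphTextShuffle
-- ===== SOURCE A (Python) =====
-- def alphabetSort(word):
--     if len(word) > 2:
--         mid = sorted(list(word[1:-1]))
--         return word[0] + ''.join(mid) + word[-1]
--     else :
--         return word
--
-- def alphTextShuffle(string):
--     word = ""
--     res = ""
--     for i in string:
--         if i == ' ' :
--             res += alphabetSort(word) + ' '
--             word = ""
--         else:
--             word += i
--     res += alphabetSort(word)
--     return res
-- ===== SOURCE B (Python) =====
-- def alphabetSort(word):
--     if len(word) > 2: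
--         return word[0] + ''.join(sorted(word[1:-1])) + word[-1]
--     return word
--
-- def alphTextShuffle(string):
--     return ' '.join(alphabetSort(w) for w in string.split(' '))
-- ===== Notes on version B (the rewrite author's own statement) =====
-- stated objective: idiomatic
-- what changed: Replaces the hand-rolled character-by-character tokenizer with accumulator state by a single-space split, a map of the middle-letter sort over the words, and a single-space join.
import Mathlib
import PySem

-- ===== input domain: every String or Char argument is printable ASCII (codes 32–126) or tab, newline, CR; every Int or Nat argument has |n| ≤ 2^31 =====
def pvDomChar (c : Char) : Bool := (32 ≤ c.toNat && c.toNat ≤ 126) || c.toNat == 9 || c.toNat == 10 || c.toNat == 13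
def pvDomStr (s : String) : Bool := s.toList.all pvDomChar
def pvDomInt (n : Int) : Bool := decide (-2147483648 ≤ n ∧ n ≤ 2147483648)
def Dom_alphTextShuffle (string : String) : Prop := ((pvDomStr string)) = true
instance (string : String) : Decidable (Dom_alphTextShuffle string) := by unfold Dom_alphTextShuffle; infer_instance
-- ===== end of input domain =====

-- B replaces A's character-by-character tokenizer (accumulator for the current word) with
-- split on a single space, map the middle-letter sort over the words, and join with ' ' —
-- same return value, more idiomatic decomposition.

-- ===== PORT A =====
-- alphabetSort of Source A (over code points; word[0]/word[-1] via pyGet?, both `some` under the len > 2 guard)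
def alphabetSortA (word : List Char) : List Char :=
  if word.length > 2 then
    let mid := PySem.List.sorted (PySem.List.slice word (some 1) (some (-1))) (fun c => c) false
    match PySem.List.pyGet? word 0, PySem.List.pyGet? word (-1) with
    | some f, some l => [f] ++ mid ++ [l]
    | _, _ => word   -- unreachable when word.length > 2
  else word

-- the for-loop of A: state (word, res), one step per character
def stepA (st : List Char × List Char) (i : Char) : List Char × List Char :=
  if i == ' ' then ([], st.2 ++ alphabetSortA st.1 ++ [' ']) else (st.1 ++ [i], st.2)

def alphTextShuffle (string : String) : String :=
  String.ofList ((string.toList.foldl stepA ([], [])).2 ++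
    alphabetSortA (string.toList.foldl stepA ([], [])).1)

-- ===== PORT B =====
-- alphabetSort of Source B
def alphabetSortB (word : List Char) : List Char :=
  if word.length > 2 then
    match PySem.List.pyGet? word 0, PySem.List.pyGet? word (-1) with
    | some f, some l =>
        f :: PySem.List.sorted (PySem.List.slice word (some 1) (some (-1))) (fun c => c) false ++ [l]
    | _, _ => word   -- unreachable when word.length > 2
  else word

def alphTextShuffle_alt (string : String) : String :=
  String.ofList
    (PySem.Chars.join [' '] ((PySem.Chars.splitOn string.toList [' ']).map alphabetSortB))

-- ===== PRECONDITION & SPEC =====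
def Spec_alphTextShuffle (string : String) (out : String) : Prop := out = alphTextShuffle_alt string
instance (string : String) (out : String) : Decidable (Spec_alphTextShuffle string out) := by unfold Spec_alphTextShuffle; infer_instance

-- ===== CLAIM (what is proved, stated in full; the proofs are below) =====
def Claim_equal_alphTextShuffle : Prop := ∀ (string : String), Dom_alphTextShuffle string → Spec_alphTextShuffle string (alphTextShuffle string)

-- ===== LEMMAS AND PROOFS =====

-- a structural characterisation of Python's split(' ')
def mySplit : List Char → List (List Char)
  | [] => [[]]
  | c :: cs => if c = ' ' then [] :: mySplit cs else
      match mySplit cs with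
      | [] => [[c]]
      | t :: ts => (c :: t) :: ts

-- prepend w to the first token
def consHead (w : List Char) : List (List Char) → List (List Char)
  | [] => [w]
  | t :: ts => (w ++ t) :: ts

theorem mySplit_ne_nil (l : List Char) : mySplit l ≠ [] := by
  cases l with
  | nil => simp [mySplit]
  | cons c cs =>
    simp only [mySplit]
    split
    · simp
    · cases h : mySplit cs <;> simp

theorem consHead_nil_of_ne (l : List (List Char)) (h : l ≠ []) : consHead [] l = l := by
  cases l with
  | nil => exact absurd rfl h
  | cons t ts => simp [consHead]

theorem splitOn_go_eq (fuel : Nat) : ∀ (l cur : List Char) (accs : List (List Char)),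
    l.length < fuel →
    PySem.Chars.splitOn.go [' '] fuel l cur accs =
      accs.reverse ++ consHead cur.reverse (mySplit l) := by
  induction fuel with
  | zero => intro l cur accs h; omega
  | succ f ih =>
    intro l cur accs h
    cases l with
    | nil => simp [PySem.Chars.splitOn.go, mySplit, consHead]
    | cons c rest =>
      by_cases hc : c = ' '
      · subst hc
        have : PySem.Chars.splitOn.go [' '] (f+1) (' ' :: rest) cur accs =
            PySem.Chars.splitOn.go [' '] f rest [] (cur.reverse :: accs) := by
          simp [PySem.Chars.splitOn.go, List.isPrefixOf]
        rw [this, ih rest [] (cur.reverse :: accs) (by simpa using Nat.lt_of_succ_lt_succ h)]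
        rw [show mySplit (' ' :: rest) = [] :: mySplit rest from by simp [mySplit]]
        simp [consHead]
        cases hms : mySplit rest with
        | nil => exact absurd hms (mySplit_ne_nil rest)
        | cons t ts => rfl
      · have : PySem.Chars.splitOn.go [' '] (f+1) (c :: rest) cur accs =
            PySem.Chars.splitOn.go [' '] f rest (c :: cur) accs := by
          simp [PySem.Chars.splitOn.go, List.isPrefixOf]
          intro hcc
          exact absurd hcc.symm hc
        rw [this, ih rest (c :: cur) accs (by simpa using Nat.lt_of_succ_lt_succ h)]
        simp only [mySplit, if_neg hc, List.reverse_cons]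
        cases hms : mySplit rest with
        | nil => exact absurd hms (mySplit_ne_nil rest)
        | cons t ts => simp [consHead]

theorem splitOn_eq_mySplit (s : List Char) :
    PySem.Chars.splitOn s [' '] = mySplit s := by
  rw [PySem.Chars.splitOn, splitOn_go_eq (s.length + 1) s [] [] (by omega)]
  simp [consHead_nil_of_ne _ (mySplit_ne_nil s)]

theorem alphabetSortA_eq_B (w : List Char) : alphabetSortA w = alphabetSortB w := by
  unfold alphabetSortA alphabetSortB
  split
  · cases PySem.List.pyGet? w 0 <;> cases PySem.List.pyGet? w (-1) <;> rfl
  · rfl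

theorem join_cons_of_ne_nil (x : List Char) (l : List (List Char)) (h : l ≠ []) :
    PySem.Chars.join [' '] (x :: l) = x ++ [' '] ++ PySem.Chars.join [' '] l := by
  cases l with
  | nil => exact absurd rfl h
  | cons y ys => simp [PySem.Chars.join, List.intercalate, List.intersperse, List.flatten]

theorem loopA_eq (cs : List Char) : ∀ (word res : List Char),
    (cs.foldl stepA (word, res)).2 ++ alphabetSortA (cs.foldl stepA (word, res)).1 =
      res ++ PySem.Chars.join [' '] ((consHead word (mySplit cs)).map alphabetSortA) := by
  induction cs with
  | nil => intro word res; simp [mySplit, consHead, PySem.Chars.join, List.intercalate]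
  | cons c cs ih =>
    intro word res
    by_cases hc : c = ' '
    · subst hc
      have hstep : stepA (word, res) ' ' = ([], res ++ alphabetSortA word ++ [' ']) := by
        simp [stepA]
      rw [List.foldl_cons, hstep, ih [] (res ++ alphabetSortA word ++ [' '])]
      rw [consHead_nil_of_ne _ (mySplit_ne_nil cs)]
      rw [show mySplit (' ' :: cs) = [] :: mySplit cs from by simp [mySplit]]
      rw [show consHead word ([] :: mySplit cs) = word :: mySplit cs from by simp [consHead]]
      rw [List.map_cons, join_cons_of_ne_nil _ _ (by
        intro hmap
        exact mySplit_ne_nil cs (by simpa using hmap))]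
      simp
    · have hstep : stepA (word, res) c = (word ++ [c], res) := by
        simp [stepA, hc]
      rw [List.foldl_cons, hstep, ih (word ++ [c]) res]
      simp only [mySplit, if_neg hc]
      cases hms : mySplit cs with
      | nil => exact absurd hms (mySplit_ne_nil cs)
      | cons t ts => simp [consHead]

-- ===== VERDICT (by name: the statement is the Claim_ definition above) =====
theorem alphTextShuffle_spec : Claim_equal_alphTextShuffle := by
  intro s _
  show alphTextShuffle s = alphTextShuffle_alt s
  unfold alphTextShuffle alphTextShuffle_alt
  rw [splitOn_eq_mySplit]
  have h := loopA_eq s.toList [] []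
  rw [consHead_nil_of_ne _ (mySplit_ne_nil s.toList)] at h
  simp only [List.nil_append] at h
  rw [h, List.map_congr_left (fun w _ => alphabetSortA_eq_B w)]
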